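-- pv_equiv track=rewrite | github.com/LEDGERGHOST90/SOVEREIGN_SHADOW_3 | core/strategies/manus_framework/extract_strategy_details.py | categorize_strategy
-- ===== SOURCE A (Python) =====
-- def categorize_strategy(name, indicators):
--     """Categorize strategy based on name and indicators."""
--     name_lower = name.lower()
--
--     if 'arbitrage' in name_lower or 'contango' in name_lower:
--         return "Arbitrage"
--     elif any(x in name_lower for x in ['breakout', 'spike', 'pulse']):
--         return "Breakout"
--     elif any(x in name_lower for x in ['reversion', 'convergence', 'divergence']):
--         return "Mean Reversion"
--     elif any(x in name_lower for x in ['volatility', 'vol', 'atr', 'bandwidth']):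
--         return "Volatility"
--     elif any(x in name_lower for x in ['trend', 'crossfire', 'momentum', 'ema', 'sma']):
--         return "Trend Following"
--     elif len(indicators) >= 4:
--         return "Multi-Factor"
--     else:
--         return "Breakout"  # Default
-- ===== SOURCE B (Python) =====
-- KEYWORDS = [
--     ('arbitrage', 0, 'Arbitrage'), ('contango', 0, 'Arbitrage'),
--     ('breakout', 1, 'Breakout'), ('spike', 1, 'Breakout'), ('pulse', 1, 'Breakout'),
--     ('reversion', 2, 'Mean Reversion'), ('convergence', 2, 'Mean Reversion'),
--     ('divergence', 2, 'Mean Reversion'),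
--     ('volatility', 3, 'Volatility'), ('vol', 3, 'Volatility'),
--     ('atr', 3, 'Volatility'), ('bandwidth', 3, 'Volatility'),
--     ('trend', 4, 'Trend Following'), ('crossfire', 4, 'Trend Following'),
--     ('momentum', 4, 'Trend Following'), ('ema', 4, 'Trend Following'),
--     ('sma', 4, 'Trend Following'),
-- ]
--
-- def categorize_strategy(name, indicators):
--     """Categorize strategy based on name and indicators."""
--     name_lower = name.lower()
--     matches = [(prio, cat) for kw, prio, cat in KEYWORDS if kw in name_lower]
--     if matches:
--         return min(matches, key=lambda m: m[0])[1]
--     return "Multi-Factor" if len(indicators) >= 4 else "Breakout"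
-- ===== Notes on version B (the rewrite author's own statement) =====
-- stated objective: alternative
-- what changed: Instead of a first-match if/elif cascade over keyword groups, B scans one flat keyword-to-(priority, category) table, collects ALL matching keywords, and returns the category of the minimum-priority match; the fallback on indicator count applies only when nothing matches.
import Mathlib
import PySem

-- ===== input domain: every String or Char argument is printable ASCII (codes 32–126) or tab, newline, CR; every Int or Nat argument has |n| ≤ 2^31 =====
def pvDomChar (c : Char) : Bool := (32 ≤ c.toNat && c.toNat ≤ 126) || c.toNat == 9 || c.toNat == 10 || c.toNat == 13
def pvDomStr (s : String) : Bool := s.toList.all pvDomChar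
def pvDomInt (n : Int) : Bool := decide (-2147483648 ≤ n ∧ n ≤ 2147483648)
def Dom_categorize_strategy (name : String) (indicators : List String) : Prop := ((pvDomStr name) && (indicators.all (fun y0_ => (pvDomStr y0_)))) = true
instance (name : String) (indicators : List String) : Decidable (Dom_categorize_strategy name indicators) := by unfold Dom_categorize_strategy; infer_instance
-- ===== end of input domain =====

-- B replaces the first-match if/elif cascade by a flat keyword table: it collects ALL matching
-- keywords and returns the category of the minimum-priority match (alternative algorithm, same cost).


-- ===== PORT A =====
def categorize_strategy (name : String) (indicators : List String) : String :=
  let name_lower := PySem.Str.lower name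
  if PySem.Str.isIn "arbitrage" name_lower || PySem.Str.isIn "contango" name_lower then
    "Arbitrage"
  else if ["breakout", "spike", "pulse"].any (fun x => PySem.Str.isIn x name_lower) then
    "Breakout"
  else if ["reversion", "convergence", "divergence"].any (fun x => PySem.Str.isIn x name_lower) then
    "Mean Reversion"
  else if ["volatility", "vol", "atr", "bandwidth"].any (fun x => PySem.Str.isIn x name_lower) then
    "Volatility"
  else if ["trend", "crossfire", "momentum", "ema", "sma"].any (fun x => PySem.Str.isIn x name_lower) then
    "Trend Following"
  else if 4 ≤ indicators.length then
    "Multi-Factor"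
  else
    "Breakout"

-- ===== PORT B =====
-- flat keyword table: keyword ↦ (priority, category)
def pvKeywords : List (String × Nat × String) :=
  [("arbitrage", 0, "Arbitrage"), ("contango", 0, "Arbitrage"),
   ("breakout", 1, "Breakout"), ("spike", 1, "Breakout"), ("pulse", 1, "Breakout"),
   ("reversion", 2, "Mean Reversion"), ("convergence", 2, "Mean Reversion"),
   ("divergence", 2, "Mean Reversion"),
   ("volatility", 3, "Volatility"), ("vol", 3, "Volatility"),
   ("atr", 3, "Volatility"), ("bandwidth", 3, "Volatility"),
   ("trend", 4, "Trend Following"), ("crossfire", 4, "Trend Following"),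
   ("momentum", 4, "Trend Following"), ("ema", 4, "Trend Following"),
   ("sma", 4, "Trend Following")]

def categorize_strategy_alt (name : String) (indicators : List String) : String :=
  let name_lower := PySem.Str.lower name
  let ms := pvKeywords.filterMap
    (fun p => if PySem.Str.isIn p.1 name_lower then some p.2 else none)
  match ms with
  | m :: rest => (rest.foldl (fun best x => if x.1 < best.1 then x else best) m).2
  | [] => if 4 ≤ indicators.length then "Multi-Factor" else "Breakout"

-- ===== PRECONDITION & SPEC =====
def Spec_categorize_strategy (name : String) (indicators : List String) (out : String) : Prop := out = categorize_strategy_alt name indicators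
instance (name : String) (indicators : List String) (out : String) : Decidable (Spec_categorize_strategy name indicators out) := by unfold Spec_categorize_strategy; infer_instance

-- ===== CLAIM (what is proved, stated in full; the proofs are below) =====
def Claim_equal_categorize_strategy : Prop := ∀ (name : String) (indicators : List String), Dom_categorize_strategy name indicators → Spec_categorize_strategy name indicators (categorize_strategy name indicators)

-- ===== LEMMAS AND PROOFS =====

-- A's cascade, abstracted over the 17 keyword-membership booleans and the indicator-count test
def pvAf (a c bo sp pu re cv dv vo vl av ba tr cr mo em sm n4 : Bool) : String :=
  if a || c then "Arbitrage"
  else if bo || sp || pu then "Breakout"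
  else if re || cv || dv then "Mean Reversion"
  else if vo || vl || av || ba then "Volatility"
  else if tr || cr || mo || em || sm then "Trend Following"
  else if n4 then "Multi-Factor" else "Breakout"

-- B's min-priority scan: the matched (priority, category) pairs, abstracted over the same booleans
def pvMs (a c bo sp pu re cv dv vo vl av ba tr cr mo em sm : Bool) : List (Nat × String) :=
  (if a then [((0 : Nat), "Arbitrage")] else []) ++ (if c then [((0 : Nat), "Arbitrage")] else []) ++
  (if bo then [((1 : Nat), "Breakout")] else []) ++ (if sp then [((1 : Nat), "Breakout")] else []) ++
  (if pu then [((1 : Nat), "Breakout")] else []) ++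
  (if re then [((2 : Nat), "Mean Reversion")] else []) ++ (if cv then [((2 : Nat), "Mean Reversion")] else []) ++
  (if dv then [((2 : Nat), "Mean Reversion")] else []) ++
  (if vo then [((3 : Nat), "Volatility")] else []) ++ (if vl then [((3 : Nat), "Volatility")] else []) ++
  (if av then [((3 : Nat), "Volatility")] else []) ++ (if ba then [((3 : Nat), "Volatility")] else []) ++
  (if tr then [((4 : Nat), "Trend Following")] else []) ++ (if cr then [((4 : Nat), "Trend Following")] else []) ++
  (if mo then [((4 : Nat), "Trend Following")] else []) ++ (if em then [((4 : Nat), "Trend Following")] else []) ++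
  (if sm then [((4 : Nat), "Trend Following")] else [])

def pvBf (a c bo sp pu re cv dv vo vl av ba tr cr mo em sm n4 : Bool) : String :=
  match pvMs a c bo sp pu re cv dv vo vl av ba tr cr mo em sm with
  | m :: rest => (rest.foldl (fun best x => if x.1 < best.1 then x else best) m).2
  | [] => if n4 then "Multi-Factor" else "Breakout"

lemma pv_fm_cons {α β : Type} (g : α → Bool) (h : α → β) (x : α) (xs : List α) :
    List.filterMap (fun p => if g p then some (h p) else none) (x :: xs) =
      (if g x then [h x] else []) ++ List.filterMap (fun p => if g p then some (h p) else none) xs := by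
  cases hx : g x <;> simp [hx]

lemma pv_sub_ite {α : Type} (b : Bool) (p : α) : (if b then [p] else []).Sublist [p] := by
  cases b <;> simp

-- the matched pairs always form a sublist of the full table, hence are sorted by priority
set_option maxHeartbeats 1000000 in
lemma pvMs_pairwise (a c bo sp pu re cv dv vo vl av ba tr cr mo em sm : Bool) :
    (pvMs a c bo sp pu re cv dv vo vl av ba tr cr mo em sm).Pairwise (fun x y => x.1 ≤ y.1) := by
  unfold pvMs
  exact List.Pairwise.sublist
    (((((((((((((((((pv_sub_ite a ((0 : Nat), "Arbitrage")).append
      (pv_sub_ite c ((0 : Nat), "Arbitrage"))).append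
      (pv_sub_ite bo ((1 : Nat), "Breakout"))).append
      (pv_sub_ite sp ((1 : Nat), "Breakout"))).append
      (pv_sub_ite pu ((1 : Nat), "Breakout"))).append
      (pv_sub_ite re ((2 : Nat), "Mean Reversion"))).append
      (pv_sub_ite cv ((2 : Nat), "Mean Reversion"))).append
      (pv_sub_ite dv ((2 : Nat), "Mean Reversion"))).append
      (pv_sub_ite vo ((3 : Nat), "Volatility"))).append
      (pv_sub_ite vl ((3 : Nat), "Volatility"))).append
      (pv_sub_ite av ((3 : Nat), "Volatility"))).append
      (pv_sub_ite ba ((3 : Nat), "Volatility"))).append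
      (pv_sub_ite tr ((4 : Nat), "Trend Following"))).append
      (pv_sub_ite cr ((4 : Nat), "Trend Following"))).append
      (pv_sub_ite mo ((4 : Nat), "Trend Following"))).append
      (pv_sub_ite em ((4 : Nat), "Trend Following"))).append
      (pv_sub_ite sm ((4 : Nat), "Trend Following")))
    (by decide)

lemma pv_foldl_min_head (rest : List (Nat × String)) (m : Nat × String)
    (h : ∀ x ∈ rest, ¬ x.1 < m.1) :
    rest.foldl (fun best x => if x.1 < best.1 then x else best) m = m := by
  induction rest generalizing m with
  | nil => rfl
  | cons y ys ih =>
      simp only [List.foldl_cons]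
      rw [if_neg (h y (by simp))]
      exact ih m (fun x hx => h x (by simp [hx]))

lemma pvBf_eq_head (a c bo sp pu re cv dv vo vl av ba tr cr mo em sm n4 : Bool) :
    pvBf a c bo sp pu re cv dv vo vl av ba tr cr mo em sm n4 =
      (pvMs a c bo sp pu re cv dv vo vl av ba tr cr mo em sm).head?.elim
        (if n4 then "Multi-Factor" else "Breakout") (fun m => m.2) := by
  unfold pvBf
  have hpw := pvMs_pairwise a c bo sp pu re cv dv vo vl av ba tr cr mo em sm
  cases hms : pvMs a c bo sp pu re cv dv vo vl av ba tr cr mo em sm with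
  | nil => simp
  | cons m rest =>
      rw [hms] at hpw
      simp [pv_foldl_min_head rest m
        (fun x hx => Nat.not_lt.mpr (List.rel_of_pairwise_cons hpw hx))]

lemma pv_AB (a c bo sp pu re cv dv vo vl av ba tr cr mo em sm n4 : Bool) :
    pvAf a c bo sp pu re cv dv vo vl av ba tr cr mo em sm n4 =
    pvBf a c bo sp pu re cv dv vo vl av ba tr cr mo em sm n4 := by
  rw [pvBf_eq_head]
  unfold pvAf pvMs
  cases a <;> simp
  cases c <;> simp
  cases bo <;> simp
  cases sp <;> simp
  cases pu <;> simp
  cases re <;> simp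
  cases cv <;> simp
  cases dv <;> simp
  cases vo <;> simp
  cases vl <;> simp
  cases av <;> simp
  cases ba <;> simp
  cases tr <;> simp
  cases cr <;> simp
  cases mo <;> simp
  cases em <;> simp
  cases sm <;> simp

-- ===== VERDICT (by name: the statement is the Claim_ definition above) =====
theorem categorize_strategy_spec : Claim_equal_categorize_strategy := by
  intro name indicators _
  unfold Spec_categorize_strategy
  have hA : categorize_strategy name indicators =
      pvAf (PySem.Str.isIn "arbitrage" (PySem.Str.lower name)) (PySem.Str.isIn "contango" (PySem.Str.lower name))
        (PySem.Str.isIn "breakout" (PySem.Str.lower name)) (PySem.Str.isIn "spike" (PySem.Str.lower name))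
        (PySem.Str.isIn "pulse" (PySem.Str.lower name)) (PySem.Str.isIn "reversion" (PySem.Str.lower name))
        (PySem.Str.isIn "convergence" (PySem.Str.lower name)) (PySem.Str.isIn "divergence" (PySem.Str.lower name))
        (PySem.Str.isIn "volatility" (PySem.Str.lower name)) (PySem.Str.isIn "vol" (PySem.Str.lower name))
        (PySem.Str.isIn "atr" (PySem.Str.lower name)) (PySem.Str.isIn "bandwidth" (PySem.Str.lower name))
        (PySem.Str.isIn "trend" (PySem.Str.lower name)) (PySem.Str.isIn "crossfire" (PySem.Str.lower name))
        (PySem.Str.isIn "momentum" (PySem.Str.lower name)) (PySem.Str.isIn "ema" (PySem.Str.lower name))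
        (PySem.Str.isIn "sma" (PySem.Str.lower name)) (decide (4 ≤ indicators.length)) := by
    unfold categorize_strategy pvAf
    by_cases h4 : 4 ≤ indicators.length <;> simp [h4, or_assoc]
  have hB : categorize_strategy_alt name indicators =
      pvBf (PySem.Str.isIn "arbitrage" (PySem.Str.lower name)) (PySem.Str.isIn "contango" (PySem.Str.lower name))
        (PySem.Str.isIn "breakout" (PySem.Str.lower name)) (PySem.Str.isIn "spike" (PySem.Str.lower name))
        (PySem.Str.isIn "pulse" (PySem.Str.lower name)) (PySem.Str.isIn "reversion" (PySem.Str.lower name))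
        (PySem.Str.isIn "convergence" (PySem.Str.lower name)) (PySem.Str.isIn "divergence" (PySem.Str.lower name))
        (PySem.Str.isIn "volatility" (PySem.Str.lower name)) (PySem.Str.isIn "vol" (PySem.Str.lower name))
        (PySem.Str.isIn "atr" (PySem.Str.lower name)) (PySem.Str.isIn "bandwidth" (PySem.Str.lower name))
        (PySem.Str.isIn "trend" (PySem.Str.lower name)) (PySem.Str.isIn "crossfire" (PySem.Str.lower name))
        (PySem.Str.isIn "momentum" (PySem.Str.lower name)) (PySem.Str.isIn "ema" (PySem.Str.lower name))
        (PySem.Str.isIn "sma" (PySem.Str.lower name)) (decide (4 ≤ indicators.length)) := by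
    unfold categorize_strategy_alt pvBf pvMs pvKeywords
    simp only [pv_fm_cons, List.filterMap_nil, List.append_nil]
    by_cases h4 : 4 ≤ indicators.length <;> simp [h4]
  rw [hA, hB]
  exact pv_AB _ _ _ _ _ _ _ _ _ _ _ _ _ _ _ _ _ _
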